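-- pv_equiv track=rewrite | github.com/iamnitya/CodeStudio | 2255-count-prefixes-of-a-given-string/2255-count-prefixes-of-a-given-string.py | countPrefixes
-- ===== SOURCE A (Python) =====
-- from typing import List
--
-- def countPrefixes(words: List[str], s: str) -> int:
--     c = 0
--     p=[]
--     for i in range(1,len(s)+1):
--         k = s[0:i]
--         p.append(k)
--     for i in words:
--         if i in p:
--             c +=1
--     return c
-- ===== SOURCE B (Python) =====
-- def countPrefixes(words, s):
--     counts = {}
--     for w in words:
--         counts[w] = counts.get(w, 0) + 1
--     total = 0
--     for i in range(1, len(s) + 1):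
--         total += counts.get(s[:i], 0)
--     return total
-- ===== Notes on version B (the rewrite author's own statement) =====
-- stated objective: alternative
-- what changed: B indexes the words in a dict of occurrence counts and sums dict lookups over the prefixes of s, removing A's linear scan of the prefix list per word.
import Mathlib
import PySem

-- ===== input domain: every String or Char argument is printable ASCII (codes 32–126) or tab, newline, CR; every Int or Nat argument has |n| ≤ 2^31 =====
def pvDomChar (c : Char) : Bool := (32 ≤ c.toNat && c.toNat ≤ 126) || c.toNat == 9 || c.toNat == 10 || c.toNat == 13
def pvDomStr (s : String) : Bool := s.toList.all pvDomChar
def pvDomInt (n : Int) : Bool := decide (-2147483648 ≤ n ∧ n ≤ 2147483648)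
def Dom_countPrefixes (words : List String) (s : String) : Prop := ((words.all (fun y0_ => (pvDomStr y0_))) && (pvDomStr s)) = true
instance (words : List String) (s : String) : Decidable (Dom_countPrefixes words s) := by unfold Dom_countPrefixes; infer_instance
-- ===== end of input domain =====

-- B builds a dict of word-occurrence counts once and sums lookups over the prefixes of s,
-- instead of A's prefix list with a linear membership scan per word (alternative decomposition).

-- ===== PORT A =====
def countPrefixes (words : List String) (s : String) : Int :=
  -- c = 0; p = []; for i in range(1, len(s)+1): p.append(s[0:i])
  let p := (PySem.List.pyRange 1 (PySem.Str.len s + 1) 1).foldl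
      (fun p i => p ++ [PySem.Str.slice s (some 0) (some i)]) []
  -- for i in words: if i in p: c += 1
  words.foldl (fun c w => if w ∈ p then c + 1 else c) 0

-- ===== PORT B =====
def countPrefixes_alt (words : List String) (s : String) : Int :=
  -- counts = {}; for w in words: counts[w] = counts.get(w, 0) + 1
  let counts := words.foldl (fun d w => d.insert w (d.getD w 0 + 1))
      (PySem.Dict.empty : PySem.Dict String Int)
  -- total = 0; for i in range(1, len(s)+1): total += counts.get(s[:i], 0)
  (PySem.List.pyRange 1 (PySem.Str.len s + 1) 1).foldl
      (fun t i => t + counts.getD (PySem.Str.slice s (some 0) (some i)) 0) 0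

-- ===== PRECONDITION & SPEC =====
def Spec_countPrefixes (words : List String) (s : String) (out : Int) : Prop := out = countPrefixes_alt words s
instance (words : List String) (s : String) (out : Int) : Decidable (Spec_countPrefixes words s out) := by unfold Spec_countPrefixes; infer_instance

-- ===== CLAIM (what is proved, stated in full; the proofs are below) =====
def Claim_equal_countPrefixes : Prop := ∀ (words : List String) (s : String), Dom_countPrefixes words s → Spec_countPrefixes words s (countPrefixes words s)

-- ===== LEMMAS AND PROOFS =====

-- A 0/1-indicator sum over a duplicate-free list p of the per-key occurrence counts in `words`
-- equals the number of words that belong to p.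
theorem pv_sum_indicator (w : String) (p : List String) (hnd : p.Nodup) :
    (p.map (fun k => if k = w then (1 : Int) else 0)).sum
      = if w ∈ p then (1 : Int) else 0 := by
  induction p with
  | nil => simp
  | cons q qs ihq =>
    rcases List.nodup_cons.mp hnd with ⟨hq, hqs⟩
    by_cases hqw : q = w
    · subst hqw
      have : q ∉ qs := hq
      simp [ihq hqs, this]
    · have hne : ¬ w = q := fun h => hqw h.symm
      simp [hqw, ihq hqs, List.mem_cons, hne]

theorem pv_countP_mem_eq_sum_count (words p : List String) (hnd : p.Nodup) :
    ((words.countP (fun w => decide (w ∈ p)) : Nat) : Int)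
      = (p.map (fun k => (words.count k : Int))).sum := by
  induction words with
  | nil => simp
  | cons w ws ih =>
    have hsplit : (p.map (fun k => ((w :: ws).count k : Int))).sum
        = (p.map (fun k => (ws.count k : Int))).sum
          + (p.map (fun k => if k = w then (1 : Int) else 0)).sum := by
      rw [← List.sum_map_add]
      apply congrArg
      apply List.map_congr_left
      intro k _
      by_cases hkw : k = w
      · simp [hkw]
      · have hne : ¬ w = k := fun h => hkw h.symm
        simp [hkw, hne]
    rw [List.countP_cons, hsplit, pv_sum_indicator w p hnd, ← ih]
    by_cases hw : w ∈ p <;> simp [hw]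

theorem countPrefixes_spec : Claim_equal_countPrefixes := by
  intro words s _
  unfold Spec_countPrefixes countPrefixes countPrefixes_alt
  simp only [PySem.List.foldl_append_singleton_eq_map, List.nil_append,
    PySem.Dict.foldl_insert_getD_add_one_eq_counter]
  set r := PySem.List.pyRange 1 (PySem.Str.len s + 1) 1 with hr
  set f : Int → String := fun i => PySem.Str.slice s (some 0) (some i) with hf
  -- A side: the counting loop is countP of membership in the prefix list
  have hA := PySem.List.foldl_count_if (fun w => decide (w ∈ r.map f)) words 0
  simp only [decide_eq_true_eq] at hA
  rw [hA]
  -- B side: the summing loop is the sum of per-prefix occurrence counts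
  have hB := PySem.List.foldl_add r
    (fun i => (PySem.Dict.counter words).getD (f i) 0) 0
  rw [hB]
  have hmap : r.map (fun i => (PySem.Dict.counter words).getD (f i) 0)
      = (r.map f).map (fun k => (List.count k words : Int)) := by
    rw [List.map_map]
    apply List.map_congr_left
    intro i _
    simp [PySem.Dict.getD_counter]
  rw [hmap]
  -- the prefixes have pairwise distinct lengths, hence are duplicate-free
  have hlen : ∀ k : Int, 1 ≤ k → k < PySem.Str.len s + 1 →
      (f k).toList.length = k.toNat := by
    intro k hk1 hk2
    have h0 : (0 : Int) ≤ k := by omega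
    simp only [hf, PySem.Str.toList_slice, PySem.Chars.slice_eq_listSlice,
      PySem.List.slice_zero_start, PySem.List.slice_to _ h0, List.length_take]
    have hkl : k ≤ (s.toList.length : Int) := by
      rw [PySem.Str.len_eq] at hk2; omega
    omega
  have hnd : (r.map f).Nodup := by
    apply List.Nodup.map_on _ (PySem.List.nodup_pyRange_one 1 (PySem.Str.len s + 1))
    intro i hi j hj hfij
    rw [PySem.List.mem_pyRange_one] at hi hj
    have heq := congrArg (fun t => t.toList.length) hfij
    simp only at heq
    rw [hlen i hi.1 hi.2, hlen j hj.1 hj.2] at heq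
    omega
  rw [zero_add, zero_add]
  exact pv_countP_mem_eq_sum_count words (r.map f) hnd
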